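-- pv_equiv track=rewrite | github.com/volcengine/verl | atropos/environments/intern_bootcamp/internbootcamp_lib/internbootcamp/bootcamp/dmahmoudandehabandanotherarrayconstructiontask/dmahmoudandehabandanotherarrayconstructiontask.py | generate_b
-- ===== SOURCE A (Python) =====
-- def generate_b(a):
--     MAX_NUM = 2000000
--     prime_str = ('2 3 5 7 11 13 17 19 23 29 '
--                  '31 37 41 43 47 53 59 61 67 71 '
--                  '73 79 83 89 97 101 103 107 109 113 '
--                  '127 131 137 139 149 151 157 163 167 173 '
--                  '179 181 191 193 197 199 211 223 227 229 '
--                  '233 239 241 251 257 263 269 271 277 281 '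
--                  '283 293 307 311 313 317')
--     prime_list = [int(p) for p in prime_str.split()]
--     used = [False] * (MAX_NUM + 1)
--     n = len(a)
--     b = []
--
--     def record(x):
--         t = []
--         tmp_x = x
--         for p in prime_list:
--             if tmp_x % p == 0:
--                 while tmp_x % p == 0:
--                     tmp_x = tmp_x // p
--                 t.append(p)
--                 if tmp_x == 1:
--                     break
--         if tmp_x != 1:
--             t.append(tmp_x)
--         for ti in t:
--             if ti > MAX_NUM:
--                 continue
--             for i in range(ti, MAX_NUM + 1, ti):
--                 used[i] = True
--
--     for ai in a:
--         if ai <= MAX_NUM and not used[ai]: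
--             b.append(ai)
--             record(ai)
--         else:
--             temp = ai + 1
--             while temp <= MAX_NUM and used[temp]:
--                 temp += 1
--             if temp > MAX_NUM:
--                 temp = ai + 1
--             b.append(temp)
--             record(temp)
--             break  # Break after first replacement
--
--     temp = 2
--     while len(b) < len(a):
--         while temp <= MAX_NUM and used[temp]:
--             temp += 1
--         if temp > MAX_NUM:
--             break
--         b.append(temp)
--         record(temp)
--         temp += 1
--
--     return b
-- ===== SOURCE B (Python) =====
-- def generate_b(a):
--     # Different algorithm: instead of a 2,000,001-entry boolean sieve rewritten
--     # after each pick (A marks every multiple of every recorded factor), keep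
--     # only the set of recorded factors; a candidate is admissible iff it is
--     # divisible by none of them.  The prefix pass, the replacement search and
--     # the fill pass are also decomposed differently: the replacement is a
--     # first-match search over a range, and the fill is a single candidate loop
--     # counting down how many slots remain instead of a nested scan-then-append.
--     MAX_NUM = 2000000
--     prime_str = ('2 3 5 7 11 13 17 19 23 29 '
--                  '31 37 41 43 47 53 59 61 67 71 '
--                  '73 79 83 89 97 101 103 107 109 113 '
--                  '127 131 137 139 149 151 157 163 167 173 '
--                  '179 181 191 193 197 199 211 223 227 229 '
--                  '233 239 241 251 257 263 269 271 277 281 '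
--                  '283 293 307 311 313 317')
--     prime_list = [int(p) for p in prime_str.split()]
--     factors = set()
--
--     def split(x):
--         t = []
--         tmp_x = x
--         for p in prime_list:
--             if tmp_x % p == 0:
--                 while tmp_x % p == 0:
--                     tmp_x = tmp_x // p
--                 t.append(p)
--                 if tmp_x == 1:
--                     break
--         if tmp_x != 1:
--             t.append(tmp_x)
--         return t
--
--     def coprime(x):
--         return all(x % f != 0 for f in factors)
--
--     out = []
--     rest = 0
--     for i, ai in enumerate(a):
--         if ai <= MAX_NUM and coprime(ai):
--             out.append(ai)
--             factors.update(split(ai))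
--         else:
--             t = next((c for c in range(ai + 1, MAX_NUM + 1) if coprime(c)), ai + 1)
--             out.append(t)
--             factors.update(split(t))
--             rest = len(a) - i - 1
--             break
--
--     c = 2
--     while rest > 0 and c <= MAX_NUM:
--         if coprime(c):
--             out.append(c)
--             factors.update(split(c))
--             rest -= 1
--         c += 1
--     return out
-- ===== Notes on version B (the rewrite author's own statement) =====
-- stated objective: alternative
-- what changed: A decides admissibility with a 2,000,001-entry boolean sieve, marking every multiple of every recorded factor after each pick; B keeps only the set of recorded factors and tests candidates by trial divisibility, decomposed differently: the replacement is a first-match search over a range and the fill phase is one candidate loop with a remaining-slots counter instead of A's nested scan-then-append loops. It trades A's O(MAX/p) marking passes per recorded factor for a per-candidate divisibility test against the factor set.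
-- outside the precondition, e.g. on generate_b([-4, -2]): A returns [-4, -2], B returns [-4, -1]
import Mathlib
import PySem

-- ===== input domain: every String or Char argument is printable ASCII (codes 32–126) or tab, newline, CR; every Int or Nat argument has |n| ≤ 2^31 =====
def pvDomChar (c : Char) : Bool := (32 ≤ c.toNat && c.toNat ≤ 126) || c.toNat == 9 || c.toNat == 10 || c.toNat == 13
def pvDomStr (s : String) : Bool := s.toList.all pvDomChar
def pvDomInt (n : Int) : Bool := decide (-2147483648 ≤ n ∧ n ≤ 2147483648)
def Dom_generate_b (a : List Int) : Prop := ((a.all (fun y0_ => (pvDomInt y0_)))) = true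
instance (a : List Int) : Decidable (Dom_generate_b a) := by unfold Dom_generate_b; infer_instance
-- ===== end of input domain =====

-- B replaces A's 2,000,001-entry boolean sieve (marking every multiple of every
-- recorded factor) by a set of recorded factors tested by trial divisibility,
-- with a first-match range search for the replacement and a single counting
-- candidate loop for the fill phase: an alternative algorithm of similar cost.

-- ===== PORT A =====
-- Shared helper of BOTH ports: Source A's record(x) and Source B's split(x) contain the
-- identical trial-division code computing the factor list t; ported once.
def pvPrimes : List Int :=
  [2, 3, 5, 7, 11, 13, 17, 19, 23, 29,
   31, 37, 41, 43, 47, 53, 59, 61, 67, 71,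
   73, 79, 83, 89, 97, 101, 103, 107, 109, 113,
   127, 131, 137, 139, 149, 151, 157, 163, 167, 173,
   179, 181, 191, 193, 197, 199, 211, 223, 227, 229,
   233, 239, 241, 251, 257, 263, 269, 271, 277, 281,
   283, 293, 307, 311, 313, 317]

-- `while tmp_x % p == 0: tmp_x = tmp_x // p` — fuel x.natAbs suffices (exact) for
-- x ≥ 1, p ≥ 2: the loop runs at most log2 x times and x.natAbs ≥ log2 x + 1.
def pvDivOut (p : Int) : Int → Nat → Int
  | x, 0 => x
  | x, f + 1 => if PySem.Int.mod x p = 0 then pvDivOut p (PySem.Int.floordiv x p) f else x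

def pvSplitGo : List Int → Int → List Int → List Int × Int
  | [], x, t => (t, x)
  | p :: ps, x, t =>
    if PySem.Int.mod x p = 0 then
      if pvDivOut p x x.natAbs = 1 then (t ++ [p], pvDivOut p x x.natAbs)
      else pvSplitGo ps (pvDivOut p x x.natAbs) (t ++ [p])
    else pvSplitGo ps x t

def pvSplit (x : Int) : List Int :=
  let r := pvSplitGo pvPrimes x []
  if r.2 ≠ 1 then r.1 ++ [r.2] else r.1

-- A's sieve `used` is a Python list of MAX_NUM+1 booleans; ported as Array Bool so
-- an update is O(1). On the admitted domain every read/write index is in range,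
-- where setIfInBounds / getElem?+getD are exact.
def pvUsedA (u : Array Bool) (i : Int) : Bool := (u[i.toNat]?).getD false

-- `for i in range(ti, MAX_NUM + 1, ti): used[i] = True` (skipping ti > MAX_NUM)
def pvMarkFactor (u : Array Bool) (ti : Int) : Array Bool :=
  if ti > 2000000 then u
  else (PySem.List.pyRange ti 2000001 ti).foldl (fun u i => u.setIfInBounds i.toNat true) u

def pvRecordA (u : Array Bool) (x : Int) : Array Bool := (pvSplit x).foldl pvMarkFactor u

-- `while temp <= MAX_NUM and used[temp]: temp += 1` — fuel (2000001-temp).toNat+1 is exact.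
def pvScanA (u : Array Bool) : Int → Nat → Int
  | temp, 0 => temp
  | temp, f + 1 =>
    if temp ≤ 2000000 ∧ pvUsedA u temp = true then pvScanA u (temp + 1) f else temp

-- `temp = ai + 1; while ...: temp += 1; if temp > MAX_NUM: temp = ai + 1`
def pvReplA (u : Array Bool) (ai : Int) : Int :=
  if pvScanA u (ai + 1) ((2000001 - (ai + 1)).toNat + 1) > 2000000 then ai + 1
  else pvScanA u (ai + 1) ((2000001 - (ai + 1)).toNat + 1)

-- the `for ai in a` loop (with its break after the first replacement)
def pvPhase1A (u : Array Bool) (b : List Int) : List Int → Array Bool × List Int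
  | [] => (u, b)
  | ai :: rest =>
    if ai ≤ 2000000 ∧ ¬ pvUsedA u ai = true then
      pvPhase1A (pvRecordA u ai) (b ++ [ai]) rest
    else
      (pvRecordA u (pvReplA u ai), b ++ [pvReplA u ai])

def pvNextA (u : Array Bool) (temp : Int) : Int := pvScanA u temp ((2000001 - temp).toNat + 1)

-- `while len(b) < n:` — temp strictly increases each iteration and the loop breaks
-- once temp > MAX_NUM, so fuel 2000002 is exact.
def pvFillA (u : Array Bool) (b : List Int) (temp : Int) (n : Nat) : Nat → List Int
  | 0 => b
  | f + 1 =>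
    if b.length < n then
      if pvNextA u temp > 2000000 then b
      else pvFillA (pvRecordA u (pvNextA u temp)) (b ++ [pvNextA u temp]) (pvNextA u temp + 1) n f
    else b

def generate_b (a : List Int) : List Int :=
  let u := Array.replicate 2000001 false
  let r := pvPhase1A u [] a
  pvFillA r.1 r.2 2 a.length 2000002

-- ===== PORT B =====
-- coprime(x) = all(x % f != 0 for f in factors)  (order-independent over the set)
def pvCoprime (fs : PySem.Set Int) (x : Int) : Bool :=
  fs.all (fun f => decide (PySem.Int.mod x f ≠ 0))

-- next((c for c in range(ai + 1, MAX_NUM + 1) if coprime(c)), ai + 1)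
def pvFindB (fs : PySem.Set Int) (ai : Int) : Int :=
  ((PySem.List.pyRange (ai + 1) 2000001 1).find? (fun c => pvCoprime fs c)).getD (ai + 1)

-- the `for i, ai in enumerate(a)` loop: returns (out, factors, rest)
def pvLoopB (fs : PySem.Set Int) : List Int → List Int × PySem.Set Int × Nat
  | [] => ([], fs, 0)
  | ai :: rl =>
    if ai ≤ 2000000 ∧ pvCoprime fs ai then
      let r := pvLoopB (PySem.Set.update fs (pvSplit ai)) rl
      (ai :: r.1, r.2.1, r.2.2)
    else
      let t := pvFindB fs ai
      ([t], PySem.Set.update fs (pvSplit t), rl.length)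

-- `c = 2; while rest > 0 and c <= MAX_NUM: ...; c += 1` — one candidate per step,
-- so fuel 2000000 (> number of candidates 2..2000000) is exact.
def pvFillAlt (fs : PySem.Set Int) (rest : Nat) (c : Int) : Nat → List Int
  | 0 => []
  | g + 1 =>
    if 0 < rest ∧ c ≤ 2000000 then
      if pvCoprime fs c then c :: pvFillAlt (PySem.Set.update fs (pvSplit c)) (rest - 1) (c + 1) g
      else pvFillAlt fs rest (c + 1) g
    else []

def generate_b_alt (a : List Int) : List Int :=
  let r := pvLoopB PySem.Set.empty a
  r.1 ++ pvFillAlt r.2.1 r.2.2 2 2000000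

-- ===== PRECONDITION & SPEC =====
-- Pre_ restricts to the task's natural domain of positive array entries: on an
-- element 0 both programs loop forever (0 // p == 0), and on negative elements A's
-- result depends on Python negative-index wraparound into the sieve array, an
-- accident outside the task's domain.
def Pre_generate_b (a : List Int) : Prop := ∀ x ∈ a, 1 ≤ x
instance (a : List Int) : Decidable (Pre_generate_b a) := by unfold Pre_generate_b; infer_instance
def pvWitness_generate_b : List Int := [5, 3]

def Spec_generate_b (a : List Int) (out : List Int) : Prop := out = generate_b_alt a
instance (a : List Int) (out : List Int) : Decidable (Spec_generate_b a out) := by unfold Spec_generate_b; infer_instance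

-- ===== CLAIM (what is proved, stated in full; the proofs are below) =====
def Claim_equal_generate_b : Prop := ∀ (a : List Int), Dom_generate_b a → Pre_generate_b a → Spec_generate_b a (generate_b a)

-- ===== LEMMAS AND PROOFS =====

-- the invariant tying A's sieve to B's factor set: A's array says "used" exactly
-- where B's divisibility test says "not coprime", on every index both sides read
def pvInv (u : Array Bool) (fs : PySem.Set Int) : Prop :=
  u.size = 2000001 ∧ ∀ i : Int, 1 ≤ i → i ≤ 2000000 → pvUsedA u i = !pvCoprime fs i

theorem pvDivOut_pos {p x : Int} (hp : 2 ≤ p) (hx : 1 ≤ x) (f : Nat) : 1 ≤ pvDivOut p x f := by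
  induction f generalizing x with
  | zero => simpa [pvDivOut] using hx
  | succ f ih =>
    unfold pvDivOut
    split
    · rename_i hm
      apply ih
      rw [PySem.Int.mod_eq_zero_iff_dvd] at hm
      obtain ⟨c, hc⟩ := hm
      have hc1 : 1 ≤ c := by nlinarith
      rw [PySem.Int.floordiv_eq_ediv_of_pos (by omega), hc, Int.mul_ediv_cancel_left _ (by omega)]
      exact hc1
    · exact hx

theorem pvSplitGo_spec {ps : List Int} (hps : ∀ p ∈ ps, 2 ≤ p) {x : Int} (hx : 1 ≤ x)
    {t : List Int} (ht : ∀ f ∈ t, 2 ≤ f) :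
    (∀ f ∈ (pvSplitGo ps x t).1, 2 ≤ f) ∧ 1 ≤ (pvSplitGo ps x t).2 := by
  induction ps generalizing x t with
  | nil => exact ⟨ht, hx⟩
  | cons p ps ih =>
    have hp : 2 ≤ p := hps p (by simp)
    have hps' : ∀ q ∈ ps, 2 ≤ q := fun q hq => hps q (by simp [hq])
    unfold pvSplitGo
    split
    · rename_i hm
      have hx' : 1 ≤ pvDivOut p x x.natAbs := pvDivOut_pos hp hx _
      have ht' : ∀ f ∈ t ++ [p], 2 ≤ f := by
        intro f hf
        rcases List.mem_append.mp hf with hf | hf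
        · exact ht f hf
        · simp at hf; omega
      split
      · exact ⟨ht', by omega⟩
      · exact ih hps' hx' ht'
    · exact ih hps' hx ht

theorem pvSplit_pos {x : Int} (hx : 1 ≤ x) : ∀ f ∈ pvSplit x, 2 ≤ f := by
  have h := pvSplitGo_spec (ps := pvPrimes) (by decide) hx (t := []) (by simp)
  unfold pvSplit
  show ∀ f ∈ (if (pvSplitGo pvPrimes x []).2 ≠ 1 then (pvSplitGo pvPrimes x []).1 ++ [(pvSplitGo pvPrimes x []).2] else (pvSplitGo pvPrimes x []).1), 2 ≤ f
  split
  · rename_i hne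
    intro f hf
    rcases List.mem_append.mp hf with hf | hf
    · exact h.1 f hf
    · simp at hf
      have := h.2
      omega
  · exact h.1

theorem pvFoldlSet_size (L : List Int) (u : Array Bool) :
    (L.foldl (fun u i => u.setIfInBounds i.toNat true) u).size = u.size := by
  induction L generalizing u with
  | nil => rfl
  | cons x L ih => simp [List.foldl_cons, ih, Array.size_setIfInBounds]

theorem pvFoldlSet_get (L : List Int) (u : Array Bool) (j : Nat) (hj : j < u.size) :
    (((L.foldl (fun u i => u.setIfInBounds i.toNat true) u)[j]?).getD false)
      = ((u[j]?).getD false || L.any (fun x => x.toNat == j)) := by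
  induction L generalizing u with
  | nil => simp
  | cons x L ih =>
    rw [List.foldl_cons, List.any_cons]
    rw [ih (u.setIfInBounds x.toNat true) (by simpa [Array.size_setIfInBounds] using hj)]
    have hstep : (((u.setIfInBounds x.toNat true)[j]?).getD false)
        = ((u[j]?).getD false || (x.toNat == j)) := by
      rw [Array.getElem?_setIfInBounds]
      by_cases hx : x.toNat = j
      · subst hx
        simp [hj]
      · simp [hx]
    rw [hstep, Bool.or_assoc]

theorem pvMarkFactor_size (u : Array Bool) (ti : Int) : (pvMarkFactor u ti).size = u.size := by
  unfold pvMarkFactor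
  split
  · rfl
  · exact pvFoldlSet_size _ u

theorem pvUsedA_markFactor (u : Array Bool) (hu : u.size = 2000001) {ti i : Int}
    (hti : 2 ≤ ti) (hi1 : 1 ≤ i) (hi2 : i ≤ 2000000) :
    pvUsedA (pvMarkFactor u ti) i = (pvUsedA u i || decide (PySem.Int.mod i ti = 0)) := by
  unfold pvMarkFactor
  split
  · rename_i hgt
    have hnd : ¬ PySem.Int.mod i ti = 0 := by
      rw [PySem.Int.mod_eq_zero_iff_dvd]
      intro hdvd
      have := Int.le_of_dvd (by omega) hdvd
      omega
    simp [hnd]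
  · rename_i hle
    rw [not_lt] at hle
    unfold pvUsedA
    rw [pvFoldlSet_get _ u i.toNat (by omega)]
    congr 1
    have hmem : ∀ x : Int, x ∈ PySem.List.pyRange ti 2000001 ti ↔ ti ≤ x ∧ x < 2000001 ∧ ti ∣ x - ti :=
      fun x => PySem.List.mem_pyRange_iff_of_pos (by omega) x
    by_cases hd : PySem.Int.mod i ti = 0
    · have hdvd : ti ∣ i := (PySem.Int.mod_eq_zero_iff_dvd i ti).mp hd
      have hit : ti ≤ i := Int.le_of_dvd (by omega) hdvd
      have hmi : i ∈ PySem.List.pyRange ti 2000001 ti :=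
        (hmem i).mpr ⟨hit, by omega, dvd_sub hdvd dvd_rfl⟩
      rw [decide_eq_true hd]
      exact List.any_eq_true.mpr ⟨i, hmi, by simp⟩
    · rw [decide_eq_false hd]
      rw [List.any_eq_false]
      intro x hx
      obtain ⟨h1, h2, h3⟩ := (hmem x).1 hx
      simp only [beq_iff_eq]
      intro heq
      have hxi : x = i := by omega
      subst hxi
      refine hd ((PySem.Int.mod_eq_zero_iff_dvd x ti).mpr ?_)
      have h4 := dvd_add h3 (dvd_refl ti)
      simpa using h4

theorem pvCoprime_add (fs : PySem.Set Int) (f x : Int) :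
    pvCoprime (PySem.Set.add fs f) x = (pvCoprime fs x && decide (PySem.Int.mod x f ≠ 0)) := by
  unfold pvCoprime PySem.Set.add
  split
  · rename_i hc
    have hmem : f ∈ fs := (PySem.Set.contains_iff fs f).mp hc
    cases hall : fs.all (fun g => decide (PySem.Int.mod x g ≠ 0)) with
    | true =>
      have := List.all_eq_true.mp hall f hmem
      simp [this]
    | false => simp
  · rw [List.all_append]
    simp

theorem pvInv_step {u : Array Bool} {fs : PySem.Set Int} (h : pvInv u fs) {f : Int} (hf : 2 ≤ f) :
    pvInv (pvMarkFactor u f) (PySem.Set.add fs f) := by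
  constructor
  · rw [pvMarkFactor_size, h.1]
  · intro i hi1 hi2
    rw [pvUsedA_markFactor u h.1 hf hi1 hi2, pvCoprime_add, h.2 i hi1 hi2]
    cases hcp : pvCoprime fs i <;> by_cases hd : PySem.Int.mod i f = 0 <;> simp [hd]

theorem pvInv_foldl {L : List Int} (hL : ∀ f ∈ L, 2 ≤ f) :
    ∀ {u : Array Bool} {fs : PySem.Set Int}, pvInv u fs →
      pvInv (L.foldl pvMarkFactor u) (L.foldl PySem.Set.add fs) := by
  induction L with
  | nil => exact fun h => h
  | cons f L ih =>
    intro u fs h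
    rw [List.foldl_cons, List.foldl_cons]
    exact ih (fun g hg => hL g (by simp [hg])) (pvInv_step h (hL f (by simp)))

theorem pvInv_record {u : Array Bool} {fs : PySem.Set Int} (h : pvInv u fs) {x : Int} (hx : 1 ≤ x) :
    pvInv (pvRecordA u x) (PySem.Set.update fs (pvSplit x)) := by
  unfold pvRecordA PySem.Set.update
  exact pvInv_foldl (pvSplit_pos hx) h

-- A's while-scan computed through B's eyes: it is the first coprime candidate of
-- the range [s, 2000001), or 2000001 when there is none.
theorem pvScan_find {u : Array Bool} {fs : PySem.Set Int} (h : pvInv u fs) :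
    ∀ (k : Nat) (s : Int), 1 ≤ s → s ≤ 2000001 → (2000001 - s).toNat = k →
      pvScanA u s (k + 1)
        = ((PySem.List.pyRange s 2000001 1).find? (fun c => pvCoprime fs c)).getD 2000001 := by
  intro k
  induction k with
  | zero =>
    intro s h1 h2 hk
    have hs : s = 2000001 := by omega
    subst hs
    rw [PySem.List.pyRange_one_eq_nil (by omega)]
    simp [pvScanA]
  | succ k ih =>
    intro s h1 h2 hk
    have hsle : s ≤ 2000000 := by omega
    rw [PySem.List.pyRange_one_cons (by omega)]
    have hus : pvUsedA u s = !pvCoprime fs s := h.2 s h1 hsle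
    cases hcp : pvCoprime fs s with
    | true =>
      rw [List.find?_cons_of_pos (by simp [hcp])]
      have : ¬ (s ≤ 2000000 ∧ pvUsedA u s = true) := by
        rw [hus, hcp]; simp
      simp [pvScanA, this]
    | false =>
      rw [List.find?_cons_of_neg (by simp [hcp])]
      have hcond : s ≤ 2000000 ∧ pvUsedA u s = true := by
        rw [hus, hcp]; exact ⟨hsle, rfl⟩
      show pvScanA u s (k + 1 + 1) = _
      rw [show pvScanA u s (k + 1 + 1) = pvScanA u (s + 1) (k + 1) by simp [pvScanA, hcond]]
      exact ih (s + 1) (by omega) (by omega) (by omega)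

theorem pvRepl_eq {u : Array Bool} {fs : PySem.Set Int} (h : pvInv u fs) {ai : Int} (hai : 1 ≤ ai) :
    pvReplA u ai = pvFindB fs ai := by
  unfold pvReplA pvFindB
  by_cases hle : ai + 1 ≤ 2000001
  · rw [pvScan_find h ((2000001 - (ai + 1)).toNat) (ai + 1) (by omega) hle rfl]
    cases hf : (PySem.List.pyRange (ai + 1) 2000001 1).find? (fun c => pvCoprime fs c) with
    | none => simp
    | some c =>
      have hmem : c ∈ PySem.List.pyRange (ai + 1) 2000001 1 := List.mem_of_find?_eq_some hf
      have hc : ai + 1 ≤ c ∧ c < 2000001 := PySem.List.mem_pyRange_one.mp hmem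
      simp only [Option.getD_some]
      rw [if_neg (by omega)]
  · have h0 : (2000001 - (ai + 1)).toNat = 0 := by omega
    rw [h0]
    have : ¬ (ai + 1 ≤ 2000000 ∧ pvUsedA u (ai + 1) = true) := by
      intro hc; omega
    rw [show pvScanA u (ai + 1) (0 + 1) = ai + 1 by
      simp only [pvScanA]
      exact if_neg this]
    rw [if_pos (by omega), PySem.List.pyRange_one_eq_nil (by omega)]
    rfl

theorem pvFindB_ge (fs : PySem.Set Int) (ai : Int) : ai + 1 ≤ pvFindB fs ai := by
  unfold pvFindB
  cases hf : (PySem.List.pyRange (ai + 1) 2000001 1).find? (fun c => pvCoprime fs c) with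
  | none => simp
  | some c =>
    have hmem := List.mem_of_find?_eq_some hf
    have := PySem.List.mem_pyRange_one.mp hmem
    simpa using this.1

-- A's fill loop (inner scan + append, counted by picks) equals B's single
-- candidate loop (counted by candidates), given the invariant.
theorem pvFill_eq :
    ∀ (g : Nat) {u : Array Bool} {fs : PySem.Set Int}, pvInv u fs →
      ∀ (c : Int), 1 ≤ c → (2000001 - c).toNat < g →
        ∀ (b : List Int) (r : Nat) (F : Nat), (2000001 - c).toNat < F →
          pvFillA u b c (b.length + r) F = b ++ pvFillAlt fs r c g := by
  intro g
  induction g with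
  | zero => intro _ _ _ _ _ hlt; omega
  | succ g ih =>
    intro u fs h c hc hg b r F hF
    obtain ⟨F', rfl⟩ : ∃ F', F = F' + 1 := ⟨F - 1, by omega⟩
    cases r with
    | zero =>
      rw [show pvFillA u b c (b.length + 0) (F' + 1) = b by simp [pvFillA]]
      simp [pvFillAlt]
    | succ r' =>
      by_cases hcm : c ≤ 2000000
      · have hus : pvUsedA u c = !pvCoprime fs c := h.2 c hc hcm
        cases hcp : pvCoprime fs c with
        | true =>
          -- next(c) = c: the scan stops immediately
          have hnext : pvNextA u c = c := by
            have : ¬ (c ≤ 2000000 ∧ pvUsedA u c = true) := by rw [hus, hcp]; simp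
            unfold pvNextA
            simp [pvScanA, this]
          rw [show pvFillA u b c (b.length + (r' + 1)) (F' + 1)
              = pvFillA (pvRecordA u c) (b ++ [c]) (c + 1) (b.length + (r' + 1)) F' by
            simp [pvFillA, hnext]; omega]
          have hlen : b.length + (r' + 1) = (b ++ [c]).length + r' := by simp; omega
          rw [hlen, ih (pvInv_record h hc) (c + 1) (by omega) (by omega) _ _ F' (by omega)]
          rw [show pvFillAlt fs (r' + 1) c (g + 1)
              = c :: pvFillAlt (PySem.Set.update fs (pvSplit c)) r' (c + 1) g by
            simp [pvFillAlt, hcm, hcp]]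
          simp
        | false =>
          -- c is used: A's scan skips it, B's loop steps past it
          have hcond : c ≤ 2000000 ∧ pvUsedA u c = true := by rw [hus, hcp]; exact ⟨hcm, rfl⟩
          have hnext : pvNextA u c = pvNextA u (c + 1) := by
            unfold pvNextA
            rw [show (2000001 - c).toNat + 1 = ((2000001 - (c + 1)).toNat + 1) + 1 by omega]
            simp [pvScanA, hcond]
          rw [show pvFillA u b c (b.length + (r' + 1)) (F' + 1)
              = pvFillA u b (c + 1) (b.length + (r' + 1)) (F' + 1) by
            simp only [pvFillA, hnext]]
          rw [ih h (c + 1) (by omega) (by omega) _ _ (F' + 1) (by omega)]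
          rw [show pvFillAlt fs (r' + 1) c (g + 1) = pvFillAlt fs (r' + 1) (c + 1) g by
            simp [pvFillAlt, hcm, hcp]]
      · -- c is past the sieve: both loops stop
        have hnext : pvNextA u c = c := by
          have h0 : (2000001 - c).toNat = 0 := by omega
          unfold pvNextA
          rw [h0]
          have : ¬ (c ≤ 2000000 ∧ pvUsedA u c = true) := fun hx => hcm hx.1
          simp [pvScanA, this]
        rw [show pvFillA u b c (b.length + (r' + 1)) (F' + 1) = b by
          simp [pvFillA, hnext]; omega]
        rw [show pvFillAlt fs (r' + 1) c (g + 1) = [] by simp [pvFillAlt]; omega]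
        simp

-- A's prefix loop equals B's: same output list, invariant preserved, and B's
-- `rest` counter accounts for exactly the missing slots.
theorem pvPhase1_eq {l : List Int} :
    ∀ {u : Array Bool} {fs : PySem.Set Int}, pvInv u fs → (∀ x ∈ l, 1 ≤ x) → ∀ (b : List Int),
      (pvPhase1A u b l).2 = b ++ (pvLoopB fs l).1 ∧
      pvInv (pvPhase1A u b l).1 (pvLoopB fs l).2.1 ∧
      b.length + l.length = (pvPhase1A u b l).2.length + (pvLoopB fs l).2.2 := by
  induction l with
  | nil => exact fun h _ b => ⟨by simp [pvPhase1A, pvLoopB], h, by simp [pvPhase1A, pvLoopB]⟩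
  | cons ai rest ih =>
    intro u fs h hl b
    have hai : 1 ≤ ai := hl ai (by simp)
    have hcond : (ai ≤ 2000000 ∧ ¬ pvUsedA u ai = true) ↔ (ai ≤ 2000000 ∧ pvCoprime fs ai = true) := by
      by_cases hle : ai ≤ 2000000
      · rw [h.2 ai hai hle]
        cases pvCoprime fs ai <;> simp
      · exact ⟨fun hc => absurd hc.1 hle, fun hc => absurd hc.1 hle⟩
    unfold pvPhase1A pvLoopB
    by_cases hc : ai ≤ 2000000 ∧ ¬ pvUsedA u ai = true
    · rw [if_pos hc, if_pos (by simpa using hcond.mp hc)]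
      obtain ⟨h1, h2, h3⟩ := ih (pvInv_record h hai) (fun x hx => hl x (by simp [hx])) (b ++ [ai])
      refine ⟨by rw [h1]; simp, h2, ?_⟩
      simp only [List.length_append, List.length_cons, List.length_nil] at h3 ⊢
      omega
    · rw [if_neg hc, if_neg (by rw [← hcond] at *; simpa using hc)]
      rw [pvRepl_eq h hai]
      have ht : 1 ≤ pvFindB fs ai := le_trans (by omega) (pvFindB_ge fs ai)
      refine ⟨by simp, pvInv_record h ht, by simp; omega⟩

theorem pvInv_init : pvInv (Array.replicate 2000001 false) PySem.Set.empty := by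
  constructor
  · simp
  · intro i hi1 hi2
    unfold pvUsedA pvCoprime
    rw [Array.getElem?_replicate, if_pos (by omega)]
    rfl

-- ===== VERDICT (by name: the statement is the Claim_ definition above) =====
theorem generate_b_spec : Claim_equal_generate_b := by
  intro a _ hpre
  unfold Spec_generate_b generate_b generate_b_alt
  obtain ⟨hb, hinv, hlen⟩ := pvPhase1_eq pvInv_init hpre []
  simp only [List.nil_append, List.length_nil, Nat.zero_add] at hb hlen
  show pvFillA (pvPhase1A (Array.replicate 2000001 false) [] a).1
      (pvPhase1A (Array.replicate 2000001 false) [] a).2 2 a.length 2000002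
    = (pvLoopB PySem.Set.empty a).1
        ++ pvFillAlt (pvLoopB PySem.Set.empty a).2.1 (pvLoopB PySem.Set.empty a).2.2 2 2000000
  rw [hb]
  rw [show a.length = (pvLoopB PySem.Set.empty a).1.length + (pvLoopB PySem.Set.empty a).2.2 by
    rw [hb] at hlen
    exact hlen]
  exact pvFill_eq 2000000 hinv 2 (by norm_num) (by norm_num) _ _ 2000002 (by norm_num)
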